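-- pv_equiv track=rewrite | github.com/ahmad-aloradi/adversarial-robustness-for-sr | scripts/fix_contaminated_logs.py | find_restart_weight_norms
-- ===== SOURCE A (Python) =====
-- def find_restart_weight_norms(rows):
--     """Return index of first data row belonging to a restarted run, or None."""
--     prev = -1
--     for i, row in enumerate(rows):
--         try:
--             epoch = int(row["epoch"])
--         except (KeyError, ValueError):
--             continue
--         if epoch < prev:
--             return i
--         prev = epoch
--     return None
-- ===== SOURCE B (Python) =====
-- def find_restart_weight_norms(rows):
--     """Return index of first data row belonging to a restarted run, or None."""
--     parsed = []
--     for i, row in enumerate(rows):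
--         try:
--             parsed.append((i, int(row["epoch"])))
--         except (KeyError, ValueError):
--             pass
--     prefixed = [(-1, -1)] + parsed
--     for (_, prev_epoch), (idx, epoch) in zip(prefixed, parsed):
--         if epoch < prev_epoch:
--             return idx
--     return None
-- ===== Notes on version B (the rewrite author's own statement) =====
-- stated objective: alternative
-- what changed: Replaces A's single stateful try/except loop with two passes: first collect (index, parsed epoch) pairs for rows whose epoch parses, then zip that list against itself shifted by one (with a (-1,-1) sentinel prefixed) and return the index of the first adjacent strict descent.
import Mathlib
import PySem

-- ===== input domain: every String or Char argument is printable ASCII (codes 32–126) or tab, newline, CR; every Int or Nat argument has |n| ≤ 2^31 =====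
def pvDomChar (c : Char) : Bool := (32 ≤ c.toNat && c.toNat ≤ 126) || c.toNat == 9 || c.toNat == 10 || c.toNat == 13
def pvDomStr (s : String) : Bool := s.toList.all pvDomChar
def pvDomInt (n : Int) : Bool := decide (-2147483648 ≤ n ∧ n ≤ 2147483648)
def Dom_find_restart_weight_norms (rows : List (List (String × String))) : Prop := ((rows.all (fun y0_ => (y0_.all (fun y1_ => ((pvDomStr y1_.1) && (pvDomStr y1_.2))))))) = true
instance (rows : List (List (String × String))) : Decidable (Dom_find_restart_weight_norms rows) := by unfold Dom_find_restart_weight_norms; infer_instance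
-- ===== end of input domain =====

-- B replaces A's single stateful try/except loop with two passes: collect the (index, parsed epoch) pairs, then zip against the sentinel-prefixed list to find the first adjacent strict descent (alternative decomposition, same cost).


-- ===== PORT A =====
-- int(row["epoch"]) with KeyError/ValueError both caught: none exactly when either raises
def pvEpoch? (row : List (String × String)) : Option Int :=
  ((PySem.Dict.mk row).get? "epoch").bind PySem.Int.ofStr?

-- A's for-loop with early return, over enumerate(rows), carrying prev
def pvLoopA : List (Int × List (String × String)) → Int → Option Int
  | [], _ => none
  | (i, row) :: rest, prev =>
    match pvEpoch? row with
    | none => pvLoopA rest prev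
    | some epoch => if epoch < prev then some i else pvLoopA rest epoch

def find_restart_weight_norms (rows : List (List (String × String))) : Option Int :=
  pvLoopA (PySem.List.enumerate rows 0) (-1)

-- ===== PORT B =====
-- B's first pass: keep only rows whose epoch parses, as (original index, epoch)
def pvParsedB : List (Int × List (String × String)) → List (Int × Int)
  | [] => []
  | (i, row) :: rest =>
    match pvEpoch? row with
    | none => pvParsedB rest
    | some epoch => (i, epoch) :: pvParsedB rest

-- B's second pass: zip the sentinel-prefixed list against the parsed list, first adjacent descent
def pvZipScanB : List ((Int × Int) × (Int × Int)) → Option Int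
  | [] => none
  | ((_, prev_epoch), (idx, epoch)) :: rest =>
    if epoch < prev_epoch then some idx else pvZipScanB rest

def find_restart_weight_norms_alt (rows : List (List (String × String))) : Option Int :=
  let parsed := pvParsedB (PySem.List.enumerate rows 0)
  pvZipScanB (List.zip ((-1, -1) :: parsed) parsed)

-- ===== PRECONDITION & SPEC =====
def Spec_find_restart_weight_norms (rows : List (List (String × String))) (out : Option Int) : Prop := out = find_restart_weight_norms_alt rows
instance (rows : List (List (String × String))) (out : Option Int) : Decidable (Spec_find_restart_weight_norms rows out) := by unfold Spec_find_restart_weight_norms; infer_instance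

-- ===== CLAIM (what is proved, stated in full; the proofs are below) =====
def Claim_equal_find_restart_weight_norms : Prop := ∀ (rows : List (List (String × String))), Dom_find_restart_weight_norms rows → Spec_find_restart_weight_norms rows (find_restart_weight_norms rows)

-- ===== LEMMAS AND PROOFS =====
-- A's loop from state `prev` equals B's zip scan with sentinel (a, prev); the sentinel's index a is never used
theorem pvLoopA_eq_zipScan (l : List (Int × List (String × String))) (a prev : Int) :
    pvLoopA l prev = pvZipScanB (List.zip ((a, prev) :: pvParsedB l) (pvParsedB l)) := by
  induction l generalizing a prev with
  | nil => rfl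
  | cons p rest ih =>
    obtain ⟨i, row⟩ := p
    simp only [pvLoopA, pvParsedB]
    cases pvEpoch? row with
    | none => exact ih a prev
    | some epoch =>
      simp only [List.zip, List.zipWith, pvZipScanB]
      split
      · rfl
      · exact ih i epoch

-- ===== VERDICT (by name: the statement is the Claim_ definition above) =====
theorem find_restart_weight_norms_spec : Claim_equal_find_restart_weight_norms := by
  intro rows _
  unfold Spec_find_restart_weight_norms find_restart_weight_norms find_restart_weight_norms_alt
  exact pvLoopA_eq_zipScan _ _ _
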